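-- pv_equiv track=rewrite | github.com/pedrolucas802/java-lts-performance-lab | scripts/charts/generate_quarkus_charts.py | collect_scenarios
-- ===== SOURCE A (Python) =====
-- def collect_scenarios(data: dict) -> list[str]:
--     """Collect every scenario present in the dataset with a stable display order."""
--     preferred_order = [
--         "products",
--         "products-db",
--         "transform",
--         "mixed-workload",
--         "aggregate-platform",
--         "aggregate-virtual",
--         "aggregate",
--     ]
--
--     discovered = set()
--     for scenarios in data.values():
--         discovered.update(scenarios.keys())
--
--     ordered = [scenario for scenario in preferred_order if scenario in discovered]
--     extras = sorted(discovered.difference(preferred_order))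
--     return ordered + extras
-- ===== SOURCE B (Python) =====
-- def collect_scenarios(data: dict) -> list[str]:
--     """Collect every scenario present in the dataset with a stable display order."""
--     preferred_order = [
--         "products",
--         "products-db",
--         "transform",
--         "mixed-workload",
--         "aggregate-platform",
--         "aggregate-virtual",
--         "aggregate",
--     ]
--     rank = {name: idx for idx, name in enumerate(preferred_order)}
--     discovered = {scenario for scenarios in data.values() for scenario in scenarios}
--     return sorted(discovered, key=lambda s: (rank.get(s, len(preferred_order)), s))
-- ===== Notes on version B (the rewrite author's own statement) =====
-- stated objective: simpler
-- what changed: Replaces A's two-phase ordering (filter the preferred list against the set, separately sort the leftover extras, concatenate) by one keyed sort of the discovered set under the tuple key (rank.get(s, len(preferred_order)), s), with the rank dict built once from enumerate(preferred_order).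
import Mathlib
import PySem

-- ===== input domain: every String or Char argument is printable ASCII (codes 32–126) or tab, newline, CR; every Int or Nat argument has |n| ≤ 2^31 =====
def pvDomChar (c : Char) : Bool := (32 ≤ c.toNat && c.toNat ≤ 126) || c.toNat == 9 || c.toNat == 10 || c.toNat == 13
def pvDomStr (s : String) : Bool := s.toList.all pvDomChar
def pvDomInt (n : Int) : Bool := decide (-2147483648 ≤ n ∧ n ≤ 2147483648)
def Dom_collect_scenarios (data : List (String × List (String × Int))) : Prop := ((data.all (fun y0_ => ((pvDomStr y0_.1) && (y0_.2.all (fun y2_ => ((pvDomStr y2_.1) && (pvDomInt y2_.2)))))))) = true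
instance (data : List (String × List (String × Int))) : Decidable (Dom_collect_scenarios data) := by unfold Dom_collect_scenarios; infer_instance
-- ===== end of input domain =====

-- B replaces A's two-phase ordering (preferred filter + sorted extras concatenated) by a single
-- sort of the discovered set under the tuple key (rank.get(s, len(preferred)), s); objective: simpler.

-- ===== PORT A =====
def collect_scenarios (data : List (String × List (String × Int))) : List String :=
  let preferred_order : List String :=
    ["products", "products-db", "transform", "mixed-workload",
     "aggregate-platform", "aggregate-virtual", "aggregate"]
  let discovered : PySem.Set String :=
    data.foldl (fun s p => PySem.Set.update s (p.2.map (fun q => q.1))) PySem.Set.empty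
  let ordered : List String := preferred_order.filter (fun sc => PySem.Set.contains discovered sc)
  let extras : List String := PySem.List.sorted (PySem.Set.diff discovered preferred_order) (fun x => x) false
  ordered ++ extras

-- ===== PORT B =====
def collect_scenarios_alt (data : List (String × List (String × Int))) : List String :=
  let preferred_order : List String :=
    ["products", "products-db", "transform", "mixed-workload",
     "aggregate-platform", "aggregate-virtual", "aggregate"]
  let rank : PySem.Dict String Int :=
    (PySem.List.enumerate preferred_order).foldl (fun d p => d.insert p.2 p.1) PySem.Dict.empty
  let discovered : PySem.Set String :=
    PySem.Set.ofList (data.flatMap (fun p => p.2.map (fun q => q.1)))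
  PySem.List.sorted2 discovered
    (fun s => rank.getD s (preferred_order.length : Int)) (fun s => s) false

-- ===== PRECONDITION & SPEC =====
def Spec_collect_scenarios (data : List (String × List (String × Int))) (out : List String) : Prop := out = collect_scenarios_alt data
instance (data : List (String × List (String × Int))) (out : List String) : Decidable (Spec_collect_scenarios data out) := by unfold Spec_collect_scenarios; infer_instance

-- ===== CLAIM (what is proved, stated in full; the proofs are below) =====
def Claim_equal_collect_scenarios : Prop := ∀ (data : List (String × List (String × Int))), Dom_collect_scenarios data → Spec_collect_scenarios data (collect_scenarios data)

-- ===== LEMMAS AND PROOFS =====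

-- Proof-side abbreviations (not used by the ports).
def pvPref : List String :=
  ["products", "products-db", "transform", "mixed-workload",
   "aggregate-platform", "aggregate-virtual", "aggregate"]

def pvRank : PySem.Dict String Int :=
  (PySem.List.enumerate pvPref).foldl (fun d p => d.insert p.2 p.1) PySem.Dict.empty

def pvKeyList (data : List (String × List (String × Int))) : List String :=
  data.flatMap (fun p => p.2.map (fun q => q.1))

def pvKey (s : String) : Lex (Int × String) := toLex (pvRank.getD s 7, s)

-- sorted2 with a two-component key is sorted with the lexicographic key.
theorem pv_sorted2_eq_sorted {α κ₁ κ₂ : Type} [LinearOrder κ₁] [LinearOrder κ₂]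
    (xs : List α) (k1 : α → κ₁) (k2 : α → κ₂) :
    PySem.List.sorted2 xs k1 k2 false
      = PySem.List.sorted xs (fun x => toLex (k1 x, k2 x)) false := by
  have hb : (fun a b => decide (k1 a < k1 b) || (!decide (k1 b < k1 a) && decide (k2 a < k2 b)))
      = (fun (a b : α) => decide (toLex (k1 a, k2 a) < toLex (k1 b, k2 b))) := by
    funext a b
    rcases lt_trichotomy (k1 a) (k1 b) with h | h | h
    · simp [h, Prod.Lex.lt_iff]
    · simp [h, Prod.Lex.lt_iff]
    · have h1 : ¬ k1 a < k1 b := not_lt_of_gt h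
      simp [Prod.Lex.lt_iff, h, h1]
      intro heq
      exact absurd heq h.ne'
  show xs.foldl (fun acc x => PySem.List.insertBy
      (fun a b => decide (k1 a < k1 b) || (!decide (k1 b < k1 a) && decide (k2 a < k2 b))) x acc) []
    = xs.foldl (fun acc x => PySem.List.insertBy
      (fun a b => decide (toLex (k1 a, k2 a) < toLex (k1 b, k2 b))) x acc) []
  rw [hb]

-- A's set-building loop equals one flatMap update.
theorem pv_foldl_update (data : List (String × List (String × Int))) (s : PySem.Set String) :
    data.foldl (fun s p => PySem.Set.update s (p.2.map (fun q => q.1))) s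
      = PySem.Set.update s (pvKeyList data) := by
  induction data generalizing s with
  | nil => simp [pvKeyList, PySem.Set.update_nil]
  | cons hd tl ih => simp [pvKeyList, PySem.Set.update_append, ih, pvKeyList]

theorem pv_rank_keys : pvRank.keys = pvPref := by decide

theorem pv_k1_of_not_mem {s : String} (h : s ∉ pvPref) : pvRank.getD s 7 = 7 := by
  apply PySem.Dict.getD_of_not_contains
  rw [PySem.Dict.contains_eq_decide_mem_keys, pv_rank_keys]
  simpa using h

theorem pv_k1_lt_of_mem {s : String} (h : s ∈ pvPref) : pvRank.getD s 7 < 7 := by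
  simp only [pvPref, List.mem_cons, List.not_mem_nil, or_false] at h
  rcases h with rfl | rfl | rfl | rfl | rfl | rfl | rfl <;> decide

theorem pv_pref_nodup : pvPref.Nodup := by decide

theorem pv_pref_pairwise : pvPref.Pairwise (fun a b => pvRank.getD a 7 < pvRank.getD b 7) := by decide

-- the main combinatorial step
theorem pv_main (data : List (String × List (String × Int))) :
    (pvPref.filter (fun sc => PySem.Set.contains (PySem.Set.ofList (pvKeyList data)) sc))
      ++ PySem.List.sorted (PySem.Set.diff (PySem.Set.ofList (pvKeyList data)) pvPref) (fun x => x) false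
    = PySem.List.sorted (PySem.Set.ofList (pvKeyList data)) pvKey false := by
  set disc : PySem.Set String := PySem.Set.ofList (pvKeyList data) with hdisc
  have hdnd : (disc : List String).Nodup := PySem.Set.nodup_ofList _
  set ordered : List String := pvPref.filter (fun sc => PySem.Set.contains disc sc) with hord
  set extras : List String :=
    PySem.List.sorted (PySem.Set.diff disc pvPref) (fun x => x) false with hext
  have hmem_ord : ∀ {x : String}, x ∈ ordered ↔ x ∈ pvPref ∧ x ∈ (disc : List String) := by
    intro x
    simp [hord, List.mem_filter]
  have hmem_ext : ∀ {x : String}, x ∈ extras ↔ x ∈ (disc : List String) ∧ x ∉ pvPref := by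
    intro x
    rw [hext, PySem.List.mem_sorted, PySem.Set.mem_diff]
  have hnd_ord : ordered.Nodup := pv_pref_nodup.filter _
  have hnd_ext : extras.Nodup := by
    rw [(PySem.List.sorted_perm _ _ _).nodup_iff]
    exact PySem.Set.nodup_diff _ _ hdnd
  have hdisj : ordered.Disjoint extras := by
    intro x hx hx'
    exact (hmem_ext.mp hx').2 (hmem_ord.mp hx).1
  have hperm : (ordered ++ extras).Perm (disc : List String) := by
    rw [List.perm_ext_iff_of_nodup (hnd_ord.append hnd_ext hdisj) hdnd]
    intro a
    constructor
    · intro h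
      rcases List.mem_append.mp h with h | h
      · exact (hmem_ord.mp h).2
      · exact (hmem_ext.mp h).1
    · intro h
      by_cases hp : a ∈ pvPref
      · exact List.mem_append.mpr (Or.inl (hmem_ord.mpr ⟨hp, h⟩))
      · exact List.mem_append.mpr (Or.inr (hmem_ext.mpr ⟨h, hp⟩))
  have hpw : (ordered ++ extras).Pairwise (fun a b => pvKey a < pvKey b) := by
    rw [List.pairwise_append]
    refine ⟨?_, ?_, ?_⟩
    · have h1 : ordered.Pairwise (fun a b => pvRank.getD a 7 < pvRank.getD b 7) :=
        pv_pref_pairwise.sublist List.filter_sublist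
      refine h1.imp (fun h => ?_)
      simp only [pvKey, Prod.Lex.lt_iff, ofLex_toLex]
      exact Or.inl h
    · have hle : extras.Pairwise (fun a b : String => a ≤ b) :=
        PySem.List.sorted_pairwise _ _
      have hlt : extras.Pairwise (fun a b : String => a < b) :=
        (hle.and hnd_ext).imp (fun h => lt_of_le_of_ne h.1 h.2)
      refine hlt.imp_of_mem (fun {a b} ha hb h => ?_)
      have h7a := pv_k1_of_not_mem (hmem_ext.mp ha).2
      have h7b := pv_k1_of_not_mem (hmem_ext.mp hb).2
      simp only [pvKey, Prod.Lex.lt_iff, ofLex_toLex]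
      exact Or.inr ⟨by rw [h7a, h7b], h⟩
    · intro a ha b hb
      have h1 := pv_k1_lt_of_mem (hmem_ord.mp ha).1
      have h2 := pv_k1_of_not_mem (hmem_ext.mp hb).2
      simp only [pvKey, Prod.Lex.lt_iff, ofLex_toLex]
      exact Or.inl (by rw [h2]; exact h1)
  exact (PySem.List.sorted_eq_of_perm_of_pairwise_lt _ _ _ hperm hpw).symm

-- ===== VERDICT (by name: the statement is the Claim_ definition above) =====
theorem collect_scenarios_spec : Claim_equal_collect_scenarios := by
  intro data _
  show collect_scenarios data = collect_scenarios_alt data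
  simp only [collect_scenarios, collect_scenarios_alt]
  rw [pv_foldl_update data PySem.Set.empty]
  rw [show (PySem.Set.empty : PySem.Set String) = ([] : List String) from rfl,
      PySem.Set.update_nil_left]
  rw [show ((["products", "products-db", "transform", "mixed-workload",
     "aggregate-platform", "aggregate-virtual", "aggregate"] : List String).length : Int) = (7 : Int) from rfl]
  rw [pv_sorted2_eq_sorted]
  exact pv_main data
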